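-- pv_equiv track=rewrite | github.com/Oleksandr-Uvarov/coursematerial_2425 | 07-tuples/19-assignment-election-winner/student.py | election_winner
-- ===== SOURCE A (Python) =====
-- def election_winner(votes):
--     if len(votes) == 0:
--         return None
--
--     max_count = 0
--     max_votes_name = ""
--
--     for vote in votes:
--         count = 0
--         name = vote
--         for vote_2 in votes:
--             if vote == vote_2:
--                 count += 1
--         if count > max_count:
--             max_count = count
--             max_votes_name = name
--     return max_votes_name
-- ===== SOURCE B (Python) =====
-- def election_winner(votes):
--     # Build a frequency table once, then pick the head of a stable
--     # descending sort by count (Counter.most_common's strategy):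
--     # ties keep first-seen order, matching A's earliest-first winner.
--     if not votes:
--         return None
--     counts = {}
--     for v in votes:
--         counts[v] = counts.get(v, 0) + 1
--     return sorted(counts.items(), key=lambda kv: kv[1], reverse=True)[0][0]
-- ===== Notes on version B (the rewrite author's own statement) =====
-- stated objective: faster
-- what changed: Replaces A's quadratic nested re-count of the whole list for every vote with one dict-building pass followed by a stable descending sort of the (name,count) items (Counter.most_common's strategy), whose head is the winner.
import Mathlib
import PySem

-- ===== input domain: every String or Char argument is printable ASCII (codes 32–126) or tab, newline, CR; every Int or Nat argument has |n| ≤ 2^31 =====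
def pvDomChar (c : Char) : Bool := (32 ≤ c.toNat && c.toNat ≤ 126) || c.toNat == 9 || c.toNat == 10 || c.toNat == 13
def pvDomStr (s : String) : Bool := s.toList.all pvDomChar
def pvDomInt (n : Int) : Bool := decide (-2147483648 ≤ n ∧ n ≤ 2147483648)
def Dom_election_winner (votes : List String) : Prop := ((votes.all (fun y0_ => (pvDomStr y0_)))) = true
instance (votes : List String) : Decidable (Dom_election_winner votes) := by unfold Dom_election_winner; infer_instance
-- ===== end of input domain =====

-- B replaces A's nested re-count of the whole list for every vote by one counting
-- pass into a dict followed by a stable descending sort of the items (the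
-- Counter.most_common strategy); the objective is speed (one pass + sort vs
-- quadratic rescans).

-- ===== PORT A =====
-- literal transliteration of A: guard len == 0, then the nested counting loops
-- tracking (max_count, max_votes_name) with a strict '>' update.
def election_winner (votes : List String) : Option String :=
  if votes.length = 0 then none
  else
    let r := votes.foldl (fun (s : Int × String) vote =>
      let count : Int := votes.foldl
        (fun (c : Int) vote2 => if vote == vote2 then c + 1 else c) 0
      let name := vote
      if count > s.1 then (count, name) else s) ((0 : Int), "")
    some r.2

-- ===== PORT B =====
-- literal transliteration of Source B: empty guard, dict-counting loop, then
-- sorted(items, key=count, reverse=True)[0][0] (the [0] access is written as a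
-- match; the [] branch is Python's unreachable IndexError branch).
def election_winner_alt (votes : List String) : Option String :=
  if votes.isEmpty then none
  else
    let counts := votes.foldl
      (fun (d : PySem.Dict String Int) v => d.insert v (d.getD v 0 + 1))
      PySem.Dict.empty
    match PySem.List.sorted counts.items (fun kv => kv.2) true with
    | [] => none
    | kv :: _ => some kv.1

-- ===== PRECONDITION & SPEC =====
def Spec_election_winner (votes : List String) (out : Option String) : Prop := out = election_winner_alt votes
instance (votes : List String) (out : Option String) : Decidable (Spec_election_winner votes out) := by unfold Spec_election_winner; infer_instance

-- ===== CLAIM (what is proved, stated in full; the proofs are below) =====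
def Claim_equal_election_winner : Prop := ∀ (votes : List String), Dom_election_winner votes → Spec_election_winner votes (election_winner votes)

-- ===== LEMMAS AND PROOFS =====

-- A's loop step (C = the fixed count function) and loop.
def aStep (C : String → Int) (s : Int × String) (v : String) : Int × String :=
  if C v > s.1 then (C v, v) else s

def aLoop (C : String → Int) (l : List String) (s : Int × String) : Int × String :=
  l.foldl (aStep C) s

-- the "head of the descending stable insertion sort" fold.
def hStep (h : Option (String × Int)) (x : String × Int) : Option (String × Int) :=
  match h with
  | none => some x
  | some m => if m.2 < x.2 then some x else some m

theorem head?_insertBy {α : Type} (bef : α → α → Bool) (x : α) (ys : List α) :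
    (PySem.List.insertBy bef x ys).head? =
      match ys.head? with
      | none => some x
      | some y => if bef x y then some x else some y := by
  cases ys with
  | nil => simp [PySem.List.insertBy]
  | cons y t =>
    by_cases h : bef x y
    · simp [PySem.List.insertBy, h]
    · simp [PySem.List.insertBy, h]

theorem head?_foldl_insertBy {α : Type} (bef : α → α → Bool) (l : List α) (acc : List α) :
    (l.foldl (fun a x => PySem.List.insertBy bef x a) acc).head? =
      l.foldl (fun h x =>
        match h with
        | none => some x
        | some m => if bef x m then some x else some m) acc.head? := by
  induction l generalizing acc with
  | nil => rfl
  | cons x t ih =>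
    simp only [List.foldl_cons, ih, head?_insertBy]

theorem head?_sorted_rev (l : List (String × Int)) :
    (PySem.List.sorted l (fun kv => kv.2) true).head? = l.foldl hStep none := by
  rw [PySem.List.sorted_rev_eq_foldl_insertBy, head?_foldl_insertBy]
  have : ([] : List (String × Int)).head? = none := rfl
  rw [this]
  congr 1
  funext h x
  cases h with
  | none => rfl
  | some m => simp [hStep]

theorem hLoop_isSome (l : List (String × Int)) (m : String × Int) :
    (l.foldl hStep (some m)).isSome := by
  induction l generalizing m with
  | nil => rfl
  | cons x t ih =>
    simp only [List.foldl_cons, hStep]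
    by_cases h : m.2 < x.2
    · simp [h, ih]
    · simp [h, ih]

theorem aLoop_fst_le (C : String → Int) (l : List String) (s : Int × String) :
    s.1 ≤ (aLoop C l s).1 := by
  induction l generalizing s with
  | nil => simp [aLoop]
  | cons v t ih =>
    simp only [aLoop, List.foldl_cons]
    refine le_trans ?_ (ih (aStep C s v))
    unfold aStep
    split
    · next h => simp; omega
    · simp

theorem aLoop_fst_ge (C : String → Int) (l : List String) (s : Int × String)
    (v : String) (hv : v ∈ l) : C v ≤ (aLoop C l s).1 := by
  induction l generalizing s with
  | nil => cases hv
  | cons u t ih =>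
    simp only [aLoop, List.foldl_cons]
    rcases List.mem_cons.mp hv with h | h
    · subst h
      refine le_trans ?_ (aLoop_fst_le C t (aStep C s v))
      unfold aStep; split <;> omega
    · exact ih (aStep C s u) h

theorem ofList_ne_nil {α : Type} [BEq α] [LawfulBEq α] (l : List α) (hl : l ≠ []) :
    PySem.Set.ofList l ≠ [] := by
  cases l with
  | nil => exact absurd rfl hl
  | cons v t =>
    intro h
    have : v ∈ PySem.Set.ofList (v :: t) := (PySem.Set.mem_ofList _ _).mpr (List.mem_cons_self ..)
    rw [h] at this
    cases this

-- the invariant tying A's loop to the head fold over the deduplicated pairs.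
theorem aLoop_eq_hLoop (C : String → Int) (l : List String)
    (hC : ∀ v ∈ l, 1 ≤ C v) :
    aLoop C l ((0 : Int), "") =
      match ((PySem.Set.ofList l).map (fun k => (k, C k))).foldl hStep none with
      | none => ((0 : Int), "")
      | some (k, c) => (c, k) := by
  induction l using List.reverseRecOn with
  | nil => rfl
  | append_singleton l x ih =>
    have hCl : ∀ v ∈ l, 1 ≤ C v := fun v hv => hC v (List.mem_append_left _ hv)
    have hCx : 1 ≤ C x := hC x (List.mem_append_right _ (List.mem_cons_self ..))
    have hofl : PySem.Set.ofList (l ++ [x]) = (PySem.Set.ofList l).add x :=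
      PySem.Set.ofList_append l [x]
    by_cases hx : x ∈ l
    · -- duplicate: both sides unchanged
      have hset : PySem.Set.ofList (l ++ [x]) = PySem.Set.ofList l := by
        rw [hofl]; simp [PySem.Set.add, PySem.Set.mem_ofList, hx]
      have hle : C x ≤ (aLoop C l ((0 : Int), "")).1 := aLoop_fst_ge C l _ x hx
      have hstep : aStep C (aLoop C l ((0 : Int), "")) x = aLoop C l ((0 : Int), "") := by
        unfold aStep; split <;> [omega; rfl]
      calc aLoop C (l ++ [x]) ((0 : Int), "")
          = aStep C (aLoop C l ((0 : Int), "")) x := by simp [aLoop]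
        _ = aLoop C l ((0 : Int), "") := hstep
        _ = _ := by rw [ih hCl, hset]
    · -- new name: appended to the set, one more hStep on the right
      have hset : PySem.Set.ofList (l ++ [x]) = PySem.Set.ofList l ++ [x] := by
        rw [hofl]; simp [PySem.Set.add, PySem.Set.mem_ofList, hx]
      have hA : aLoop C (l ++ [x]) ((0 : Int), "")
          = aStep C (aLoop C l ((0 : Int), "")) x := by simp [aLoop]
      rw [hA, ih hCl, hset]
      simp only [List.map_append, List.map_cons, List.map_nil, List.foldl_append,
        List.foldl_cons, List.foldl_nil]
      cases hF : ((PySem.Set.ofList l).map (fun k => (k, C k))).foldl hStep none with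
      | none =>
        -- then l must be empty
        have hl : l = [] := by
          by_contra hne
          obtain ⟨p, ps, hps⟩ : ∃ p ps, (PySem.Set.ofList l).map (fun k => (k, C k)) = p :: ps := by
            cases hq : (PySem.Set.ofList l).map (fun k => (k, C k)) with
            | nil =>
              exact absurd (List.map_eq_nil_iff.mp hq) (ofList_ne_nil l hne)
            | cons p ps => exact ⟨p, ps, rfl⟩
          rw [hps] at hF
          have := hLoop_isSome ps p
          simp only [List.foldl_cons, hStep] at hF
          rw [hF] at this
          cases this
        subst hl
        simp only [hStep, aStep]
        have : C x > 0 := by omega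
        simp [this]
      | some kc =>
        obtain ⟨k, c⟩ := kc
        simp only [hStep, aStep]
        by_cases h : c < C x
        · simp [h]
        · simp [h]

-- the count A computes per vote, as a closed form.
theorem inner_count (votes : List String) (vote : String) :
    votes.foldl (fun (c : Int) vote2 => if vote == vote2 then c + 1 else c) 0
      = (List.count vote votes : Int) := by
  have := PySem.List.foldl_count_if (fun v2 => vote == v2) votes 0
  simp only [this, zero_add, Int.natCast_inj]
  unfold List.count
  exact List.countP_congr (fun a _ => by rw [Bool.beq_comm])

-- ===== VERDICT (by name: the statement is the Claim_ definition above) =====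
theorem election_winner_spec : Claim_equal_election_winner := by
  intro votes _
  unfold Spec_election_winner election_winner election_winner_alt
  by_cases hempty : votes = []
  · subst hempty; rfl
  · have hlen : ¬ votes.length = 0 := by simp [hempty]
    have hisEmpty : votes.isEmpty = false := by simp [hempty]
    simp only [hlen, if_false, hisEmpty, Bool.false_eq_true, if_false]
    -- rewrite A's loop into aLoop with C = count in votes
    set C : String → Int := fun v => (List.count v votes : Int) with hCdef
    have hA : votes.foldl (fun (s : Int × String) vote =>
        let count : Int := votes.foldl
          (fun (c : Int) vote2 => if vote == vote2 then c + 1 else c) 0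
        let name := vote
        if count > s.1 then (count, name) else s) ((0 : Int), "")
        = aLoop C votes ((0 : Int), "") := by
      unfold aLoop aStep
      apply PySem.List.foldl_congr_mem
      intro s vote _
      simp only [inner_count, hCdef]
    -- rewrite B's dict into the counter and its items into the dedup pairs
    have hB : (votes.foldl
        (fun (d : PySem.Dict String Int) v => d.insert v (d.getD v 0 + 1))
        PySem.Dict.empty).items
        = (PySem.Set.ofList votes).map (fun k => (k, C k)) := by
      rw [PySem.Dict.foldl_insert_getD_add_one_eq_counter, PySem.Dict.items_counter]
    have hC1 : ∀ v ∈ votes, 1 ≤ C v := by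
      intro v hv
      have : 0 < List.count v votes := List.count_pos_iff.mpr hv
      simp only [hCdef]; omega
    -- the head fold over the pairs is some (votes nonempty)
    obtain ⟨k, c, hkc⟩ : ∃ k c,
        ((PySem.Set.ofList votes).map (fun k => (k, C k))).foldl hStep none = some (k, c) := by
      obtain ⟨p, ps, hps⟩ : ∃ p ps,
          (PySem.Set.ofList votes).map (fun k => (k, C k)) = p :: ps := by
        cases hq : (PySem.Set.ofList votes).map (fun k => (k, C k)) with
        | nil => exact absurd (List.map_eq_nil_iff.mp hq) (ofList_ne_nil votes hempty)
        | cons p ps => exact ⟨p, ps, rfl⟩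
      rw [hps]
      simp only [List.foldl_cons, hStep]
      have h := hLoop_isSome ps p
      obtain ⟨kc, hkc⟩ := Option.isSome_iff_exists.mp h
      exact ⟨kc.1, kc.2, by rw [hkc]⟩
    -- identify the sorted head
    have hhead : (PySem.List.sorted
        ((votes.foldl (fun (d : PySem.Dict String Int) v => d.insert v (d.getD v 0 + 1))
          PySem.Dict.empty).items) (fun kv => kv.2) true).head? = some (k, c) := by
      rw [head?_sorted_rev, hB, hkc]
    have hAval : aLoop C votes ((0 : Int), "") = (c, k) := by
      rw [aLoop_eq_hLoop C votes hC1, hkc]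
    cases hs : PySem.List.sorted
        ((votes.foldl (fun (d : PySem.Dict String Int) v => d.insert v (d.getD v 0 + 1))
          PySem.Dict.empty).items) (fun kv => kv.2) true with
    | nil => rw [hs] at hhead; cases hhead
    | cons kv t =>
      rw [hs] at hhead
      simp only [List.head?_cons, Option.some_inj] at hhead
      simp only [hA, hAval, hhead]
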